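-- pv_equiv track=rewrite | github.com/vrbart/Q-Base-by-MVS-Final | src/ccbs_app/ai3/evolution.py | stage_index_from_token
-- ===== SOURCE A (Python) =====
-- from typing import Any
--
-- STAGES: list[dict[str, Any]] = [
--     {
--         "index": 0,
--         "name": "scribble_1",
--         "label": "Scribble I",
--         "min_xp": 0,
--         "variant_rank": 0,
--         "aliases": ["l0", "s0", "scribble_1", "scribble1", "sketch", "sketch_1", "stage0"],
--     },
--     {
--         "index": 1,
--         "name": "scribble_2",
--         "label": "Scribble II",
--         "min_xp": 2,
--         "variant_rank": 0,
--         "aliases": ["l1", "s1", "scribble_2", "scribble2", "sketch_2", "stage1"],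
--     },
--     {
--         "index": 2,
--         "name": "base",
--         "label": "Base",
--         "min_xp": 5,
--         "variant_rank": 1,
--         "aliases": ["l2", "s2", "a", "base", "stage2"],
--     },
--     {
--         "index": 3,
--         "name": "evolved",
--         "label": "Evolved",
--         "min_xp": 12,
--         "variant_rank": 2,
--         "aliases": ["l3", "s3", "b", "evolved", "stage3"],
--     },
--     {
--         "index": 4,
--         "name": "elite",
--         "label": "Elite",
--         "min_xp": 24,
--         "variant_rank": 3,
--         "aliases": ["l4", "s4", "c", "elite", "stage4"],
--     },
--     {
--         "index": 5,
--         "name": "rare",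
--         "label": "Rare",
--         "min_xp": 40,
--         "variant_rank": 4,
--         "aliases": ["l5", "s5", "d", "rare", "stage5"],
--     },
--     {
--         "index": 6,
--         "name": "mythic",
--         "label": "Mythic",
--         "min_xp": 65,
--         "variant_rank": 5,
--         "aliases": ["l6", "s6", "e", "mythic", "legend", "stage6"],
--     },
-- ]
--
-- def stage_for_index(index: int) -> dict[str, Any]:
--     if not STAGES:
--         return {"index": 0, "name": "base", "label": "Base", "min_xp": 0, "variant_rank": 1, "aliases": ["a"]}
--     idx = max(0, min(int(index), len(STAGES) - 1))
--     return dict(STAGES[idx])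
--
-- def stage_aliases(index: int) -> list[str]:
--     return [str(item).strip().lower() for item in stage_for_index(index).get("aliases", []) if str(item).strip()]
--
-- def stage_index_from_token(token: str) -> int:
--     raw = str(token or "").strip().lower()
--     if not raw:
--         return 2
--     for stage in STAGES:
--         aliases = {str(stage.get("name", "")).strip().lower(), *stage_aliases(int(stage.get("index", 0)))}
--         if raw in aliases:
--             return int(stage.get("index", 0))
--     return 2
-- ===== SOURCE B (Python) =====
-- from typing import Any
--
-- STAGES: list[dict[str, Any]] = [
--     {"index": 0, "name": "scribble_1", "label": "Scribble I", "min_xp": 0, "variant_rank": 0,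
--      "aliases": ["l0", "s0", "scribble_1", "scribble1", "sketch", "sketch_1", "stage0"]},
--     {"index": 1, "name": "scribble_2", "label": "Scribble II", "min_xp": 2, "variant_rank": 0,
--      "aliases": ["l1", "s1", "scribble_2", "scribble2", "sketch_2", "stage1"]},
--     {"index": 2, "name": "base", "label": "Base", "min_xp": 5, "variant_rank": 1,
--      "aliases": ["l2", "s2", "a", "base", "stage2"]},
--     {"index": 3, "name": "evolved", "label": "Evolved", "min_xp": 12, "variant_rank": 2,
--      "aliases": ["l3", "s3", "b", "evolved", "stage3"]},
--     {"index": 4, "name": "elite", "label": "Elite", "min_xp": 24, "variant_rank": 3,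
--      "aliases": ["l4", "s4", "c", "elite", "stage4"]},
--     {"index": 5, "name": "rare", "label": "Rare", "min_xp": 40, "variant_rank": 4,
--      "aliases": ["l5", "s5", "d", "rare", "stage5"]},
--     {"index": 6, "name": "mythic", "label": "Mythic", "min_xp": 65, "variant_rank": 5,
--      "aliases": ["l6", "s6", "e", "mythic", "legend", "stage6"]},
-- ]
--
-- # Precomputed at module load: every cleaned token -> stage index, first key wins.
-- TOKEN_TO_INDEX: dict[str, int] = {}
-- for _stage in STAGES:
--     _keys = [str(_stage.get("name", "")).strip().lower()] + [
--         str(_a).strip().lower() for _a in _stage.get("aliases", []) if str(_a).strip()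
--     ]
--     for _k in _keys:
--         TOKEN_TO_INDEX.setdefault(_k, int(_stage.get("index", 0)))
--
-- def stage_index_from_token(token: str) -> int:
--     raw = str(token or "").strip().lower()
--     if not raw:
--         return 2
--     return TOKEN_TO_INDEX.get(raw, 2)
-- ===== Notes on version B (the rewrite author's own statement) =====
-- stated objective: simpler
-- what changed: Replaces the per-call scan over STAGES with per-stage set reconstruction (stage_for_index clamping + stage_aliases cleaning inside the loop) by a token->index dict precomputed once at module load with first-wins setdefault; the call is a single normalisation plus one dict lookup.
import Mathlib
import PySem

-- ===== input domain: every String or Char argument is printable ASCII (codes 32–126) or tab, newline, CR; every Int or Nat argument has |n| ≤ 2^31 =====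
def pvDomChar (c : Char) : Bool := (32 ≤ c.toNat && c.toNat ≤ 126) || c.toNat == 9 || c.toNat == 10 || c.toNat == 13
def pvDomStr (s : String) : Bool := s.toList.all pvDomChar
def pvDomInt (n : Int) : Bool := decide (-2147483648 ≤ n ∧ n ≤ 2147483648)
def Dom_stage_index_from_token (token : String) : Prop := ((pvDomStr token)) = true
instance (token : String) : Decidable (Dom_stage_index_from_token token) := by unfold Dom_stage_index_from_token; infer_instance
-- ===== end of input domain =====

-- B replaces A's per-call scan over STAGES (with per-stage alias cleaning and set rebuilding)
-- by a token->index dict precomputed once at module load (first-wins) and a single lookup; objective: simpler.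

-- Shared module data: STAGES as (index, name, aliases).
def pvStages : List (Int × String × List String) :=
  [ (0, "scribble_1", ["l0", "s0", "scribble_1", "scribble1", "sketch", "sketch_1", "stage0"]),
    (1, "scribble_2", ["l1", "s1", "scribble_2", "scribble2", "sketch_2", "stage1"]),
    (2, "base", ["l2", "s2", "a", "base", "stage2"]),
    (3, "evolved", ["l3", "s3", "b", "evolved", "stage3"]),
    (4, "elite", ["l4", "s4", "c", "elite", "stage4"]),
    (5, "rare", ["l5", "s5", "d", "rare", "stage5"]),
    (6, "mythic", ["l6", "s6", "e", "mythic", "legend", "stage6"]) ]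

-- ===== PORT A =====
-- stage_for_index: clamp the index into range (STAGES is nonempty, so the fallback dict is dead code)
def pvStageForIndex (index : Int) : Int × String × List String :=
  if pvStages = [] then (0, "base", ["a"])
  else
    let idx := max 0 (min index ((pvStages.length : Int) - 1))
    PySem.List.pyGetD pvStages idx (0, "base", ["a"])

-- stage_aliases: [str(item).strip().lower() for item in aliases if str(item).strip()]
def pvStageAliases (index : Int) : List String :=
  ((pvStageForIndex index).2.2.filter (fun item => ¬ (PySem.Str.strip item = ""))).map
    (fun item => PySem.Str.lower (PySem.Str.strip item))

-- the 'for stage in STAGES' loop of A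
def pvFindStage (raw : String) : List (Int × String × List String) → Int
  | [] => 2
  | stage :: rest =>
      let aliases : PySem.Set String :=
        PySem.Set.ofList (PySem.Str.lower (PySem.Str.strip stage.2.1) :: pvStageAliases stage.1)
      if PySem.Set.contains aliases raw then stage.1 else pvFindStage raw rest

def stage_index_from_token (token : String) : Int :=
  let raw := PySem.Str.lower (PySem.Str.strip token)  -- str(token or "") = token for a str argument
  if raw = "" then 2 else pvFindStage raw pvStages

-- ===== PORT B =====
-- TOKEN_TO_INDEX: built once from STAGES, first key wins (setdefault)
def pvTokenToIndex : PySem.Dict String Int :=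
  pvStages.foldl
    (fun d stage =>
      (PySem.Str.lower (PySem.Str.strip stage.2.1) ::
        (stage.2.2.filter (fun a => ¬ (PySem.Str.strip a = ""))).map
          (fun a => PySem.Str.lower (PySem.Str.strip a))).foldl
        (fun d k => PySem.Dict.setdefault d k stage.1) d)
    PySem.Dict.empty

def stage_index_from_token_alt (token : String) : Int :=
  let raw := PySem.Str.lower (PySem.Str.strip token)
  if raw = "" then 2 else PySem.Dict.getD pvTokenToIndex raw 2

-- ===== PRECONDITION & SPEC =====
def Spec_stage_index_from_token (token : String) (out : Int) : Prop := out = stage_index_from_token_alt token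
instance (token : String) (out : Int) : Decidable (Spec_stage_index_from_token token out) := by unfold Spec_stage_index_from_token; infer_instance

-- ===== CLAIM (what is proved, stated in full; the proofs are below) =====
def Claim_equal_stage_index_from_token : Prop := ∀ (token : String), Dom_stage_index_from_token token → Spec_stage_index_from_token token (stage_index_from_token token)

-- ===== LEMMAS AND PROOFS =====
-- every token either function can match, in first-match order
def pvAllKeys : List String :=
  ["scribble_1", "l0", "s0", "scribble1", "sketch", "sketch_1", "stage0", "scribble_2", "l1", "s1", "scribble2", "sketch_2", "stage1", "base", "l2", "s2", "a", "stage2", "evolved", "l3", "s3", "b", "stage3", "elite", "l4", "s4", "c", "stage4", "rare", "l5", "s5", "d", "stage5", "mythic", "l6", "s6", "e", "legend", "stage6"]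

theorem pvName0 : PySem.Str.lower (PySem.Str.strip "scribble_1") = "scribble_1" := by decide
set_option maxRecDepth 4096 in
theorem pvAl0 : pvStageAliases 0 = ["l0", "s0", "scribble_1", "scribble1", "sketch", "sketch_1", "stage0"] := by decide
theorem pvName1 : PySem.Str.lower (PySem.Str.strip "scribble_2") = "scribble_2" := by decide
set_option maxRecDepth 4096 in
theorem pvAl1 : pvStageAliases 1 = ["l1", "s1", "scribble_2", "scribble2", "sketch_2", "stage1"] := by decide
theorem pvName2 : PySem.Str.lower (PySem.Str.strip "base") = "base" := by decide
set_option maxRecDepth 4096 in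
theorem pvAl2 : pvStageAliases 2 = ["l2", "s2", "a", "base", "stage2"] := by decide
theorem pvName3 : PySem.Str.lower (PySem.Str.strip "evolved") = "evolved" := by decide
set_option maxRecDepth 4096 in
theorem pvAl3 : pvStageAliases 3 = ["l3", "s3", "b", "evolved", "stage3"] := by decide
theorem pvName4 : PySem.Str.lower (PySem.Str.strip "elite") = "elite" := by decide
set_option maxRecDepth 4096 in
theorem pvAl4 : pvStageAliases 4 = ["l4", "s4", "c", "elite", "stage4"] := by decide
theorem pvName5 : PySem.Str.lower (PySem.Str.strip "rare") = "rare" := by decide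
set_option maxRecDepth 4096 in
theorem pvAl5 : pvStageAliases 5 = ["l5", "s5", "d", "rare", "stage5"] := by decide
theorem pvName6 : PySem.Str.lower (PySem.Str.strip "mythic") = "mythic" := by decide
set_option maxRecDepth 4096 in
theorem pvAl6 : pvStageAliases 6 = ["l6", "s6", "e", "mythic", "legend", "stage6"] := by decide

set_option maxRecDepth 4096 in
theorem pvTab : pvTokenToIndex.items = [("scribble_1", 0), ("l0", 0), ("s0", 0), ("scribble1", 0), ("sketch", 0), ("sketch_1", 0), ("stage0", 0), ("scribble_2", 1), ("l1", 1), ("s1", 1), ("scribble2", 1), ("sketch_2", 1), ("stage1", 1), ("base", 2), ("l2", 2), ("s2", 2), ("a", 2), ("stage2", 2), ("evolved", 3), ("l3", 3), ("s3", 3), ("b", 3), ("stage3", 3), ("elite", 4), ("l4", 4), ("s4", 4), ("c", 4), ("stage4", 4), ("rare", 5), ("l5", 5), ("s5", 5), ("d", 5), ("stage5", 5), ("mythic", 6), ("l6", 6), ("s6", 6), ("e", 6), ("legend", 6), ("stage6", 6)] := by decide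

set_option maxRecDepth 4096 in
theorem pvCore (raw : String) :
    pvFindStage raw pvStages = PySem.Dict.getD pvTokenToIndex raw 2 := by
  by_cases h : raw ∈ pvAllKeys
  · fin_cases h <;> decide
  · simp only [pvAllKeys, List.mem_cons, List.not_mem_nil, or_false, not_or] at h
    obtain ⟨h1, h2, h3, h4, h5, h6, h7, h8, h9, h10, h11, h12, h13, h14, h15, h16, h17, h18, h19, h20, h21, h22, h23, h24, h25, h26, h27, h28, h29, h30, h31, h32, h33, h34, h35, h36, h37, h38, h39⟩ := h
    have hL : pvFindStage raw pvStages = 2 := by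
      simp [pvFindStage, pvStages, pvName0, pvAl0, pvName1, pvAl1, pvName2, pvAl2, pvName3, pvAl3, pvName4, pvAl4, pvName5, pvAl5, pvName6, pvAl6, PySem.Set.contains, h1, h2, h3, h4, h5, h6, h7, h8, h9, h10, h11, h12, h13, h14, h15, h16, h17, h18, h19, h20, h21, h22, h23, h24, h25, h26, h27, h28, h29, h30, h31, h32, h33, h34, h35, h36, h37, h38, h39]
    have b1 : ("scribble_1" == raw) = false := by simp; exact Ne.symm h1
    have b2 : ("l0" == raw) = false := by simp; exact Ne.symm h2
    have b3 : ("s0" == raw) = false := by simp; exact Ne.symm h3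
    have b4 : ("scribble1" == raw) = false := by simp; exact Ne.symm h4
    have b5 : ("sketch" == raw) = false := by simp; exact Ne.symm h5
    have b6 : ("sketch_1" == raw) = false := by simp; exact Ne.symm h6
    have b7 : ("stage0" == raw) = false := by simp; exact Ne.symm h7
    have b8 : ("scribble_2" == raw) = false := by simp; exact Ne.symm h8
    have b9 : ("l1" == raw) = false := by simp; exact Ne.symm h9
    have b10 : ("s1" == raw) = false := by simp; exact Ne.symm h10
    have b11 : ("scribble2" == raw) = false := by simp; exact Ne.symm h11
    have b12 : ("sketch_2" == raw) = false := by simp; exact Ne.symm h12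
    have b13 : ("stage1" == raw) = false := by simp; exact Ne.symm h13
    have b14 : ("base" == raw) = false := by simp; exact Ne.symm h14
    have b15 : ("l2" == raw) = false := by simp; exact Ne.symm h15
    have b16 : ("s2" == raw) = false := by simp; exact Ne.symm h16
    have b17 : ("a" == raw) = false := by simp; exact Ne.symm h17
    have b18 : ("stage2" == raw) = false := by simp; exact Ne.symm h18
    have b19 : ("evolved" == raw) = false := by simp; exact Ne.symm h19
    have b20 : ("l3" == raw) = false := by simp; exact Ne.symm h20
    have b21 : ("s3" == raw) = false := by simp; exact Ne.symm h21
    have b22 : ("b" == raw) = false := by simp; exact Ne.symm h22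
    have b23 : ("stage3" == raw) = false := by simp; exact Ne.symm h23
    have b24 : ("elite" == raw) = false := by simp; exact Ne.symm h24
    have b25 : ("l4" == raw) = false := by simp; exact Ne.symm h25
    have b26 : ("s4" == raw) = false := by simp; exact Ne.symm h26
    have b27 : ("c" == raw) = false := by simp; exact Ne.symm h27
    have b28 : ("stage4" == raw) = false := by simp; exact Ne.symm h28
    have b29 : ("rare" == raw) = false := by simp; exact Ne.symm h29
    have b30 : ("l5" == raw) = false := by simp; exact Ne.symm h30
    have b31 : ("s5" == raw) = false := by simp; exact Ne.symm h31
    have b32 : ("d" == raw) = false := by simp; exact Ne.symm h32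
    have b33 : ("stage5" == raw) = false := by simp; exact Ne.symm h33
    have b34 : ("mythic" == raw) = false := by simp; exact Ne.symm h34
    have b35 : ("l6" == raw) = false := by simp; exact Ne.symm h35
    have b36 : ("s6" == raw) = false := by simp; exact Ne.symm h36
    have b37 : ("e" == raw) = false := by simp; exact Ne.symm h37
    have b38 : ("legend" == raw) = false := by simp; exact Ne.symm h38
    have b39 : ("stage6" == raw) = false := by simp; exact Ne.symm h39
    have hR : PySem.Dict.getD pvTokenToIndex raw 2 = 2 := by
      simp [PySem.Dict.getD, PySem.Dict.get?, pvTab, List.find?, b1, b2, b3, b4, b5, b6, b7, b8, b9, b10, b11, b12, b13, b14, b15, b16, b17, b18, b19, b20, b21, b22, b23, b24, b25, b26, b27, b28, b29, b30, b31, b32, b33, b34, b35, b36, b37, b38, b39]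
    rw [hL, hR]

-- ===== VERDICT (by name: the statement is the Claim_ definition above) =====
theorem stage_index_from_token_spec : Claim_equal_stage_index_from_token := by
  intro token _
  unfold Spec_stage_index_from_token stage_index_from_token stage_index_from_token_alt
  by_cases h : PySem.Str.lower (PySem.Str.strip token) = ""
  · simp [h]
  · simp [h, pvCore]
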